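-- pv_equiv track=rewrite | github.com/PavlySz/Traffic-Signs-Recognition-System | Traffic Signs Detection/process_frame.py | create_3_1d_channels
-- ===== SOURCE A (Python) =====
-- def create_3_1d_channels(dec_array):
--     # red
--     red = []
--     for i in range(0, len(dec_array), 3):
--         red.append(dec_array[i])
--
--     # green
--     green = []
--     for i in range(1, len(dec_array), 3):
--         green.append(dec_array[i])
--
--     # blue
--     blue = []
--     for i in range(2, len(dec_array), 3):
--         blue.append(dec_array[i])
--
--     return red, green, blue
-- ===== SOURCE B (Python) =====
-- def create_3_1d_channels(dec_array):
--     red, green, blue = [], [], []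
--     channels = [red, green, blue]
--     for i, x in enumerate(dec_array):
--         channels[i % 3].append(x)
--     return red, green, blue
-- ===== Notes on version B (the rewrite author's own statement) =====
-- stated objective: simpler
-- what changed: B makes a single interleaved pass over the array, dispatching each element to red/green/blue by index mod 3, instead of A's three separate strided index passes.
import Mathlib
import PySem

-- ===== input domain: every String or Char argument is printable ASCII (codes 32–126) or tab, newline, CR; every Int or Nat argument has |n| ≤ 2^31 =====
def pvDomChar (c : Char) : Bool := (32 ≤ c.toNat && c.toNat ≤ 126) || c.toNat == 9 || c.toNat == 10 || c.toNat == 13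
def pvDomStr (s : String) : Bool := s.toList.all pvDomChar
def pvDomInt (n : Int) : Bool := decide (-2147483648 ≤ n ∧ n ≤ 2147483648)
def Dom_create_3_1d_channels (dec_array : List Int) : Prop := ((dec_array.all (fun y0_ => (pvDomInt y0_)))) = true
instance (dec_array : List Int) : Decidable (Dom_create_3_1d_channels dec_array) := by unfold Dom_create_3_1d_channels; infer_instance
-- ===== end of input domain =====

-- B replaces A's three strided index passes by one interleaved pass dispatching each element by index mod 3 (simpler decomposition, same O(n) cost).

-- ===== PORT A =====
def create_3_1d_channels (dec_array : List Int) : List Int × List Int × List Int :=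
  let red := (PySem.List.pyRange 0 (dec_array.length : Int) 3).foldl
      (fun acc i => acc ++ [PySem.List.pyGetD dec_array i 0]) []
  let green := (PySem.List.pyRange 1 (dec_array.length : Int) 3).foldl
      (fun acc i => acc ++ [PySem.List.pyGetD dec_array i 0]) []
  let blue := (PySem.List.pyRange 2 (dec_array.length : Int) 3).foldl
      (fun acc i => acc ++ [PySem.List.pyGetD dec_array i 0]) []
  (red, green, blue)

-- ===== PORT B =====
def create_3_1d_channels_alt (dec_array : List Int) : List Int × List Int × List Int :=
  (PySem.List.enumerate dec_array 0).foldl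
    (fun (acc : List Int × List Int × List Int) p =>
      if PySem.Int.mod p.1 3 = 0 then (acc.1 ++ [p.2], acc.2.1, acc.2.2)
      else if PySem.Int.mod p.1 3 = 1 then (acc.1, acc.2.1 ++ [p.2], acc.2.2)
      else (acc.1, acc.2.1, acc.2.2 ++ [p.2]))
    ([], [], [])

-- ===== PRECONDITION & SPEC =====
def Spec_create_3_1d_channels (dec_array : List Int) (out : List Int × List Int × List Int) : Prop := out = create_3_1d_channels_alt dec_array
instance (dec_array : List Int) (out : List Int × List Int × List Int) : Decidable (Spec_create_3_1d_channels dec_array out) := by unfold Spec_create_3_1d_channels; infer_instance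

-- ===== CLAIM (what is proved, stated in full; the proofs are below) =====
def Claim_equal_create_3_1d_channels : Prop := ∀ (dec_array : List Int), Dom_create_3_1d_channels dec_array → Spec_create_3_1d_channels dec_array (create_3_1d_channels dec_array)

-- ===== LEMMAS AND PROOFS =====

-- Common deinterleaving specification: consume the list three elements at a time.
def pvTri : List Int → List Int × List Int × List Int
  | [] => ([], [], [])
  | [a] => ([a], [], [])
  | [a, b] => ([a], [b], [])
  | a :: b :: c :: t =>
    let p := pvTri t
    (a :: p.1, b :: p.2.1, c :: p.2.2)

-- One strided pass of A, as a map over the index range.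
def pvChan (off : Int) (xs : List Int) : List Int :=
  (PySem.List.pyRange off (xs.length : Int) 3).map (fun i => PySem.List.pyGetD xs i 0)

theorem pvA_eq_chan (xs : List Int) :
    create_3_1d_channels xs = (pvChan 0 xs, pvChan 1 xs, pvChan 2 xs) := by
  unfold create_3_1d_channels pvChan
  rw [PySem.List.foldl_append_singleton_eq_map, PySem.List.foldl_append_singleton_eq_map,
      PySem.List.foldl_append_singleton_eq_map]
  simp

theorem pvGetD_one (x y : Int) (xs : List Int) :
    PySem.List.pyGetD (x :: y :: xs) 1 0 = y := by
  unfold PySem.List.pyGetD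
  rw [PySem.List.pyGet?_of_nonneg (h := by norm_num)]
  simp [Int.toNat_one]

theorem pvGetD_two (x y z : Int) (xs : List Int) :
    PySem.List.pyGetD (x :: y :: z :: xs) 2 0 = z := by
  unfold PySem.List.pyGetD
  rw [PySem.List.pyGet?_of_nonneg (h := by norm_num)]
  rfl

theorem pvGetD_succ_cons (x : Int) (xs : List Int) (i : Int) (h : 0 ≤ i) :
    PySem.List.pyGetD (x :: xs) (i + 1) 0 = PySem.List.pyGetD xs i 0 := by
  unfold PySem.List.pyGetD
  rw [PySem.List.pyGet?_of_nonneg (h := by omega), PySem.List.pyGet?_of_nonneg (h := h)]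
  have h3 : (i + 1).toNat = i.toNat + 1 := by omega
  simp [h3]

theorem pvGetD_cons3 (a b c : Int) (t : List Int) (i : Int) (h : 0 ≤ i) :
    PySem.List.pyGetD (a :: b :: c :: t) (i + 3) 0 = PySem.List.pyGetD t i 0 := by
  have e1 : i + 3 = (i + 2) + 1 := by ring
  have e2 : i + 2 = (i + 1) + 1 := by ring
  rw [e1, pvGetD_succ_cons _ _ _ (by omega), e2, pvGetD_succ_cons _ _ _ (by omega),
      pvGetD_succ_cons _ _ _ h]

-- The chunk step of each strided pass.
theorem pvChan_step (off : Int) (h0 : 0 ≤ off) (h2 : off < 3)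
    (a b c : Int) (t : List Int) :
    pvChan off (a :: b :: c :: t) =
      PySem.List.pyGetD [a, b, c] off 0 :: pvChan off t := by
  unfold pvChan
  rw [PySem.List.pyRange_of_pos _ _ (by norm_num : (0:Int) < 3),
      PySem.List.pyRange_of_pos _ _ (by norm_num : (0:Int) < 3)]
  have hlen : (((a :: b :: c :: t).length : Int)) = (t.length : Int) + 3 := by
    simp; ring
  rw [hlen]
  set n : Int := (t.length : Int) with hn
  have hn0 : 0 ≤ n := by positivity
  have hcount : (if off < n + 3 then ((n + 3 - off + 3 - 1) / 3).toNat else 0)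
      = (if off < n then ((n - off + 3 - 1) / 3).toNat else 0) + 1 := by
    split_ifs <;> omega
  rw [hcount, List.range_succ_eq_map]
  simp only [List.map_cons, List.map_map]
  congr 1
  · -- head element
    have hz : off + 3 * (((0 : Nat) : Int)) = off := by simp
    rw [hz]
    rcases (by omega : off = 0 ∨ off = 1 ∨ off = 2) with h | h | h <;> subst h <;>
      simp [PySem.List.pyGetD_zero_cons, pvGetD_one, pvGetD_two]
  · -- tails
    apply List.map_congr_left
    intro k _
    simp only [Function.comp_apply]
    have e : off + 3 * ((Nat.succ k : Nat) : Int) = (off + 3 * (k : Int)) + 3 := by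
      push_cast [Nat.succ_eq_add_one]; ring
    rw [e, pvGetD_cons3 _ _ _ _ _ (by positivity)]

theorem pvA_eq_tri (xs : List Int) : create_3_1d_channels xs = pvTri xs := by
  rw [pvA_eq_chan]
  induction xs using pvTri.induct with
  | case1 =>
      norm_num [pvChan, pvTri, PySem.List.pyRange_of_pos _ _ (by norm_num : (0:Int) < 3)]
  | case2 a =>
      norm_num [pvChan, pvTri, PySem.List.pyRange_of_pos _ _ (by norm_num : (0:Int) < 3),
                PySem.List.pyGetD_zero_cons]
  | case3 a b =>
      norm_num [pvChan, pvTri, PySem.List.pyRange_of_pos _ _ (by norm_num : (0:Int) < 3),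
                PySem.List.pyGetD_zero_cons, pvGetD_one]
  | case4 a b c t ih =>
      rw [pvChan_step 0 (by norm_num) (by norm_num),
          pvChan_step 1 (by norm_num) (by norm_num),
          pvChan_step 2 (by norm_num) (by norm_num),
          PySem.List.pyGetD_zero_cons, pvGetD_one, pvGetD_two]
      have e1 := congrArg (fun p : List Int × List Int × List Int => p.1) ih
      have e2 := congrArg (fun p : List Int × List Int × List Int => p.2.1) ih
      have e3 := congrArg (fun p : List Int × List Int × List Int => p.2.2) ih
      simp only at e1 e2 e3
      simp [pvTri, e1, e2, e3]

theorem pvMod_eq (i : Int) : PySem.Int.mod i 3 = i % 3 :=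
  Int.fmod_eq_emod_of_nonneg i (by norm_num)

-- B-side loop invariant: folding from an index s ≡ 0 (mod 3) appends the three
-- deinterleaved channels of the remaining list to the accumulator.
theorem pvB_fold (t : List Int) :
    ∀ (s : Int) (acc : List Int × List Int × List Int), 0 ≤ s → PySem.Int.mod s 3 = 0 →
      (PySem.List.enumerate t s).foldl
        (fun (acc : List Int × List Int × List Int) p =>
          if PySem.Int.mod p.1 3 = 0 then (acc.1 ++ [p.2], acc.2.1, acc.2.2)
          else if PySem.Int.mod p.1 3 = 1 then (acc.1, acc.2.1 ++ [p.2], acc.2.2)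
          else (acc.1, acc.2.1, acc.2.2 ++ [p.2])) acc
      = (acc.1 ++ (pvTri t).1, acc.2.1 ++ (pvTri t).2.1, acc.2.2 ++ (pvTri t).2.2) := by
  induction t using pvTri.induct with
  | case1 =>
      intro s acc _ _
      simp [pvTri, PySem.List.enumerate_nil]
  | case2 a =>
      intro s acc hs hm
      rw [PySem.List.enumerate_cons, PySem.List.enumerate_nil]
      simp only [List.foldl_cons, List.foldl_nil, hm]
      simp [pvTri]
  | case3 a b =>
      intro s acc hs hm
      have hm' : s % 3 = 0 := by rw [← pvMod_eq]; exact hm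
      have m1 : PySem.Int.mod (s + 1) 3 = 1 := by rw [pvMod_eq]; omega
      rw [PySem.List.enumerate_cons, PySem.List.enumerate_cons, PySem.List.enumerate_nil]
      simp only [List.foldl_cons, List.foldl_nil, hm, m1]
      simp [pvTri]
  | case4 a b c t ih =>
      intro s acc hs hm
      have hm' : s % 3 = 0 := by rw [← pvMod_eq]; exact hm
      have m1 : PySem.Int.mod (s + 1) 3 = 1 := by rw [pvMod_eq]; omega
      have m2 : PySem.Int.mod (s + 1 + 1) 3 = 2 := by rw [pvMod_eq]; omega
      have m3 : PySem.Int.mod (s + 1 + 1 + 1) 3 = 0 := by rw [pvMod_eq]; omega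
      rw [PySem.List.enumerate_cons, PySem.List.enumerate_cons, PySem.List.enumerate_cons]
      simp only [List.foldl_cons, hm, m1, m2, reduceIte]
      simp only [show ((1:Int) = 0) = False by simp, show ((2:Int) = 0) = False by simp,
                 show ((2:Int) = 1) = False by simp, if_false]
      rw [ih (s + 1 + 1 + 1) (acc.1 ++ [a], acc.2.1 ++ [b], acc.2.2 ++ [c]) (by omega) m3]
      simp [pvTri]

theorem pvB_eq_tri (xs : List Int) : create_3_1d_channels_alt xs = pvTri xs := by
  unfold create_3_1d_channels_alt
  rw [pvB_fold xs 0 ([], [], []) (by norm_num) (by decide)]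
  simp

-- ===== VERDICT (by name: the statement is the Claim_ definition above) =====
theorem create_3_1d_channels_spec : Claim_equal_create_3_1d_channels := by
  intro xs _
  unfold Spec_create_3_1d_channels
  rw [pvA_eq_tri, pvB_eq_tri]
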